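-- pv_equiv track=rewrite | github.com/vuhung16au/essay-markings | backend/services/hybrid_grader.py | _first_argument_sentence
-- ===== SOURCE A (Python) =====
-- def _first_argument_sentence(sentences: list[str]) -> str | None:
--     for sentence in sentences:
--         lowered = sentence.lower()
--         if lowered.startswith(("first", "second", "for instance", "for example", "another", "however")):
--             return sentence
--     for sentence in sentences[1:]:
--         if len(sentence.split()) >= 8:
--             return sentence
--     return sentences[0] if sentences else None
-- ===== SOURCE B (Python) =====
-- def _first_argument_sentence(sentences: list[str]) -> str | None:
--     fallback = None
--     for i, sentence in enumerate(sentences):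
--         if sentence.lower().startswith(("first", "second", "for instance", "for example", "another", "however")):
--             return sentence
--         if i >= 1 and fallback is None and len(sentence.split()) >= 8:
--             fallback = sentence
--     if fallback is not None:
--         return fallback
--     return sentences[0] if sentences else None
-- ===== Notes on version B (the rewrite author's own statement) =====
-- stated objective: alternative
-- what changed: Replaced A's two separate scans (marker pass, then a length pass over sentences[1:]) by a single indexed forward loop that returns a marker sentence immediately and records the first long non-initial sentence as a fallback.
import Mathlib
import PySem

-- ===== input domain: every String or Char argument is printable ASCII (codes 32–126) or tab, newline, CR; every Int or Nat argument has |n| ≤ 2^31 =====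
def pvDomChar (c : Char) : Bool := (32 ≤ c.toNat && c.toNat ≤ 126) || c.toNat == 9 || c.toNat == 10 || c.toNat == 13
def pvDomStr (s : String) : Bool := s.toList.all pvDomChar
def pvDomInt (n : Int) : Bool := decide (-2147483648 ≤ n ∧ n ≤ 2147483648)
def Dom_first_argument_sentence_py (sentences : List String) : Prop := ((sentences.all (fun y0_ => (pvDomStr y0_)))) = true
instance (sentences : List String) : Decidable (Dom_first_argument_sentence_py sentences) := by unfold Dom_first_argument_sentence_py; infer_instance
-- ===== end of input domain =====

-- B replaces A's two scans by one indexed loop with a recorded fallback (alternative decomposition, same cost).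

-- ===== PORT A =====
-- 'lowered.startswith((p1, …, pn))' = check each prefix in order
def pvMarker (sentence : String) : Bool :=
  let lowered := PySem.Str.lower sentence
  PySem.Str.startswith lowered "first" || PySem.Str.startswith lowered "second" ||
  PySem.Str.startswith lowered "for instance" || PySem.Str.startswith lowered "for example" ||
  PySem.Str.startswith lowered "another" || PySem.Str.startswith lowered "however"

-- first for-loop of A: return the first marker sentence
def pvPass1 : List String → Option String
  | [] => none
  | s :: rest => if pvMarker s then some s else pvPass1 rest

-- second for-loop of A: first sentence with len(sentence.split()) >= 8
def pvPass2 : List String → Option String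
  | [] => none
  | s :: rest => if 8 ≤ (PySem.Str.split₀ s).length then some s else pvPass2 rest

def first_argument_sentence_py (sentences : List String) : Option String :=
  match pvPass1 sentences with
  | some s => some s
  | none =>
    match pvPass2 (PySem.List.slice sentences (some 1) none) with
    | some s => some s
    | none => match sentences with
              | [] => none
              | s :: _ => some s

-- ===== PORT B =====
-- the single loop of B; sentences0 is the whole input (for the post-loop 'sentences[0]' return)
def pvLoopB (sentences0 : List String) : List String → Nat → Option String → Option String
  | [], _, fb =>
    match fb with
    | some f => some f
    | none => match sentences0 with
              | [] => none
              | s :: _ => some s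
  | s :: rest, i, fb =>
    if pvMarker s then some s
    else pvLoopB sentences0 rest (i + 1)
           (if 1 ≤ i ∧ fb = none ∧ 8 ≤ (PySem.Str.split₀ s).length then some s else fb)

def first_argument_sentence_py_alt (sentences : List String) : Option String :=
  pvLoopB sentences sentences 0 none

-- ===== PRECONDITION & SPEC =====
def Spec_first_argument_sentence_py (sentences : List String) (out : Option String) : Prop := out = first_argument_sentence_py_alt sentences
instance (sentences : List String) (out : Option String) : Decidable (Spec_first_argument_sentence_py sentences out) := by unfold Spec_first_argument_sentence_py; infer_instance

-- ===== CLAIM (what is proved, stated in full; the proofs are below) =====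
def Claim_equal_first_argument_sentence_py : Prop := ∀ (sentences : List String), Dom_first_argument_sentence_py sentences → Spec_first_argument_sentence_py sentences (first_argument_sentence_py sentences)

-- ===== LEMMAS AND PROOFS =====

-- once the fallback is set, the loop only looks for markers
theorem pvLoopB_some (s0 : List String) (l : List String) (i : Nat) (f : String) :
    pvLoopB s0 l i (some f) =
      match pvPass1 l with
      | some s => some s
      | none => some f := by
  induction l generalizing i with
  | nil => simp [pvLoopB, pvPass1]
  | cons s rest ih =>
    by_cases h : pvMarker s = true <;> simp [pvLoopB, pvPass1, h, ih]

-- with no fallback yet and index ≥ 1, the loop computes A's two passes over the suffix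
theorem pvLoopB_none (s0 : List String) (l : List String) (i : Nat) (hi : 1 ≤ i) :
    pvLoopB s0 l i none =
      match pvPass1 l with
      | some s => some s
      | none =>
        match pvPass2 l with
        | some s => some s
        | none => match s0 with
                  | [] => none
                  | s :: _ => some s := by
  induction l generalizing i with
  | nil => simp [pvLoopB, pvPass1, pvPass2]
  | cons s rest ih =>
    by_cases h : pvMarker s = true
    · simp [pvLoopB, pvPass1, h]
    · by_cases hl : 8 ≤ (PySem.Str.split₀ s).length
      · simp [pvLoopB, pvPass1, pvPass2, h, hl, hi, pvLoopB_some]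
      · simp [pvLoopB, pvPass1, pvPass2, h, hl, ih (i + 1) (by omega)]

-- ===== VERDICT (by name: the statement is the Claim_ definition above) =====
theorem first_argument_sentence_py_spec : Claim_equal_first_argument_sentence_py := by
  intro sentences _
  unfold Spec_first_argument_sentence_py first_argument_sentence_py first_argument_sentence_py_alt
  cases sentences with
  | nil => simp [pvLoopB, pvPass1, pvPass2, PySem.List.slice]
  | cons s rest =>
    rw [PySem.List.slice_from_one]
    by_cases h : pvMarker s = true
    · simp [pvLoopB, pvPass1, h]
    · simp [pvLoopB, pvPass1, h, pvLoopB_none (s :: rest) rest 1 (by omega)]
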